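-- pv_equiv track=rewrite | github.com/crubio/proto-poker-tools | odds-generator.py | _can_form_full_house_pattern
-- ===== SOURCE A (Python) =====
-- from typing import List, Tuple, Optional, Dict, Set, Union
--
-- def _can_form_full_house_pattern(rank_counts: Dict[int, int], available_jokers: int) -> bool:
--     """
--     Helper function to check if jokers can be assigned to create full house pattern.
--     Args:
--         rank_counts: Counter of existing ranks
--         available_jokers: Number of jokers available to assign
--     Returns:
--         True if a 3+2 full house pattern can be formed
--     """
--     ranks = list(rank_counts.keys())
--     jokers_left = available_jokers
--
--     # Case 1: No real cards - need to create 3+2 with all jokers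
--     if not ranks:
--         return jokers_left == 5  # Can make 3+2 with 5 jokers
--
--     # Case 2: One rank - try to make it the triple, create pair with jokers
--     if len(ranks) == 1:
--         rank = ranks[0]
--         count = rank_counts[rank]
--         # Make existing rank the triple
--         if count + jokers_left >= 3:
--             jokers_used_for_triple = max(0, 3 - count)
--             jokers_remaining = jokers_left - jokers_used_for_triple
--             return jokers_remaining >= 2  # Need 2 more for pair
--         return False
--
--     # Case 3: Two or more ranks - try different 3+2 combinations
--     if len(ranks) >= 2:
--         for triple_rank in ranks:
--             for pair_rank in ranks:
--                 if triple_rank != pair_rank: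
--                     triple_count = rank_counts[triple_rank]
--                     pair_count = rank_counts[pair_rank]
--
--                     jokers_for_triple = max(0, 3 - triple_count)
--                     jokers_for_pair = max(0, 2 - pair_count)
--
--                     if jokers_for_triple + jokers_for_pair <= jokers_left:
--                         return True
--
--     # Case 4: Need to create new rank for pair/triple with jokers
--     if len(ranks) == 1:
--         return False  # Already handled above
--
--     return False
-- ===== SOURCE B (Python) =====
-- def _can_form_full_house_pattern(rank_counts, available_jokers):
--     # Pick the largest count for the triple and the second-largest (or a
--     # joker-built new rank) for the pair; one closed-form test replaces the
--     # scan over all ordered pairs of ranks.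
--     if not rank_counts:
--         return available_jokers == 5
--     counts = sorted(rank_counts.values(), reverse=True)
--     if len(counts) == 1:
--         counts.append(0)
--     return max(0, 3 - counts[0]) + max(0, 2 - counts[1]) <= available_jokers
-- ===== Notes on version B (the rewrite author's own statement) =====
-- stated objective: simpler
-- what changed: Replaces A's three-way case split with a double scan over all ordered pairs of distinct ranks by sorting the counts descending and testing the top two counts with one closed-form joker-cost formula (a phantom 0 count stands in for a joker-built pair rank).
import Mathlib
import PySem

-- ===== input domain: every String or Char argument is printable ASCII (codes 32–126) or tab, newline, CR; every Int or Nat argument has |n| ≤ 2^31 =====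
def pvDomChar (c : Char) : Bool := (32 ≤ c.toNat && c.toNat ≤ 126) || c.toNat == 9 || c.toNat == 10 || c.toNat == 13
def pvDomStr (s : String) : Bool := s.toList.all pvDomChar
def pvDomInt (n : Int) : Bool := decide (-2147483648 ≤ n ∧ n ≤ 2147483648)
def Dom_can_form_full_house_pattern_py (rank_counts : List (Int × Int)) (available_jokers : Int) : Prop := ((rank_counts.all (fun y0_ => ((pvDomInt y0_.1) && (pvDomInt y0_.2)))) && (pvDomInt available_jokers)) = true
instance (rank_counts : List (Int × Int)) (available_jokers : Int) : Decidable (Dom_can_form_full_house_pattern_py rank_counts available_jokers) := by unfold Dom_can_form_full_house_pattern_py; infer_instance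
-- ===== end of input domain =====

-- B replaces A's scan over all ordered pairs of ranks by sorting the counts
-- descending and testing the top two with one closed-form joker-cost formula
-- (objective: simpler).

-- ===== PORT A =====
-- literal transliteration of _can_form_full_house_pattern (Source A)
def can_form_full_house_pattern_py (rank_counts : List (Int × Int)) (available_jokers : Int) : Bool :=
  let d := PySem.Dict.mk rank_counts
  let ranks := PySem.Dict.keys d
  let jokers_left := available_jokers
  -- Case 1: No real cards
  if ranks.length = 0 then
    decide (jokers_left = 5)
  -- Case 2: One rank
  else if ranks.length = 1 then
    let rank := ranks.headD 0          -- ranks[0]; in range since length = 1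
    let count := PySem.Dict.getD d rank 0   -- rank_counts[rank]; rank ∈ keys, so no KeyError
    if count + jokers_left ≥ 3 then
      let jokers_used_for_triple := max 0 (3 - count)
      let jokers_remaining := jokers_left - jokers_used_for_triple
      decide (jokers_remaining ≥ 2)
    else
      false
  -- Case 3: Two or more ranks — the for/for loop with `return True` is List.any
  else
    ranks.any (fun triple_rank =>
      ranks.any (fun pair_rank =>
        if triple_rank ≠ pair_rank then
          let triple_count := PySem.Dict.getD d triple_rank 0
          let pair_count := PySem.Dict.getD d pair_rank 0
          let jokers_for_triple := max 0 (3 - triple_count)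
          let jokers_for_pair := max 0 (2 - pair_count)
          decide (jokers_for_triple + jokers_for_pair ≤ jokers_left)
        else
          false))

-- ===== PORT B =====
-- literal transliteration of Source B
def can_form_full_house_pattern_py_alt (rank_counts : List (Int × Int)) (available_jokers : Int) : Bool :=
  if rank_counts.length = 0 then
    decide (available_jokers = 5)
  else
    let counts := PySem.List.sorted (PySem.Dict.values (PySem.Dict.mk rank_counts)) (fun x => x) true
    let counts := if counts.length = 1 then counts ++ [0] else counts
    decide (max 0 (3 - counts.headD 0) + max 0 (2 - (counts.tail.headD 0)) ≤ available_jokers)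

-- ===== PRECONDITION & SPEC =====
-- Pre_ excludes association lists with duplicate keys: they do not encode any
-- Python dict (Python collapses duplicates before A ever runs), so the
-- list-level behaviour there is an artefact of the encoding, not of A.
def Pre_can_form_full_house_pattern_py (rank_counts : List (Int × Int)) (available_jokers : Int) : Prop :=
  (rank_counts.map Prod.fst).Nodup

instance (rank_counts : List (Int × Int)) (available_jokers : Int) : Decidable (Pre_can_form_full_house_pattern_py rank_counts available_jokers) := by unfold Pre_can_form_full_house_pattern_py; infer_instance

def pvWitness_can_form_full_house_pattern_py : (List (Int × Int)) × Int := ([(3, 2), (7, 1)], 2)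

def Spec_can_form_full_house_pattern_py (rank_counts : List (Int × Int)) (available_jokers : Int) (out : Bool) : Prop := out = can_form_full_house_pattern_py_alt rank_counts available_jokers
instance (rank_counts : List (Int × Int)) (available_jokers : Int) (out : Bool) : Decidable (Spec_can_form_full_house_pattern_py rank_counts available_jokers out) := by unfold Spec_can_form_full_house_pattern_py; infer_instance

-- ===== CLAIM (what is proved, stated in full; the proofs are below) =====
def Claim_equal_can_form_full_house_pattern_py : Prop := ∀ (rank_counts : List (Int × Int)) (available_jokers : Int), Dom_can_form_full_house_pattern_py rank_counts available_jokers → Pre_can_form_full_house_pattern_py rank_counts available_jokers → Spec_can_form_full_house_pattern_py rank_counts available_jokers (can_form_full_house_pattern_py rank_counts available_jokers)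

-- ===== LEMMAS AND PROOFS =====

-- the joker cost of making a rank with count `t` the triple and one with count `p` the pair
def fhCost (t p : Int) : Int := max 0 (3 - t) + max 0 (2 - p)

-- "two counts drawn without replacement from l can be completed to 3+2 with ≤ j jokers"
def fhEx (l : List Int) (j : Int) : Prop := ∃ a b, List.Subperm [a, b] l ∧ fhCost a b ≤ j

theorem subperm_pair_of_mem {α : Type} [DecidableEq α] {p q : α} {l : List α}
    (hp : p ∈ l) (hq : q ∈ l) (hne : p ≠ q) : List.Subperm [p, q] l := by
  have h1 : l.Perm (p :: l.erase p) := List.perm_cons_erase hp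
  have hq' : q ∈ l.erase p := (List.mem_erase_of_ne (Ne.symm hne)).mpr hq
  have h2 : List.Sublist [p, q] (p :: l.erase p) :=
    List.Sublist.cons₂ p (List.singleton_sublist.mpr hq')
  exact h2.subperm.trans h1.symm.subperm

theorem subperm_map_snd {l1 l2 : List (Int × Int)} (h : List.Subperm l1 l2) :
    List.Subperm (l1.map Prod.snd) (l2.map Prod.snd) := by
  obtain ⟨u, h1, h2⟩ := h
  exact ⟨u.map Prod.snd, h1.map Prod.snd, h2.map Prod.snd⟩

theorem perm_pair_cases {x y a b : Int} (h : List.Perm [x, y] [a, b]) :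
    (x = a ∧ y = b) ∨ (x = b ∧ y = a) := by
  have hx : x = a ∨ x = b := by
    have := h.subset (show x ∈ [x, y] by simp)
    simpa using this
  rcases hx with hx | hx
  · subst hx
    left
    have := h.cons_inv
    exact ⟨rfl, by simpa [List.perm_singleton] using this⟩
  · subst hx
    right
    have h2 : List.Perm [x, y] [x, a] := h.trans (List.Perm.swap x a [])
    have := h2.cons_inv
    exact ⟨rfl, by simpa [List.perm_singleton] using this⟩

theorem fhEx_perm {l l' : List Int} {j : Int} (h : List.Perm l l') :
    fhEx l j ↔ fhEx l' j := by
  constructor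
  · rintro ⟨a, b, hs, hc⟩; exact ⟨a, b, hs.trans h.subperm, hc⟩
  · rintro ⟨a, b, hs, hc⟩; exact ⟨a, b, hs.trans h.symm.subperm, hc⟩

-- on a descending list the top two counts are an optimal triple/pair choice
theorem fhEx_top2 {c1 c2 : Int} {rest : List Int} {j : Int}
    (hpw : (c1 :: c2 :: rest).Pairwise (fun a b => b ≤ a)) :
    fhEx (c1 :: c2 :: rest) j ↔ fhCost c1 c2 ≤ j := by
  rw [List.pairwise_cons] at hpw
  obtain ⟨h1, hpw2⟩ := hpw
  rw [List.pairwise_cons] at hpw2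
  obtain ⟨h2, _⟩ := hpw2
  have hc21 : c2 ≤ c1 := h1 c2 (by simp)
  constructor
  · rintro ⟨a, b, hsub, hcost⟩
    have hmema : a ∈ c1 :: c2 :: rest := hsub.subset (by simp)
    have hmemb : b ∈ c1 :: c2 :: rest := hsub.subset (by simp)
    have ha1 : a ≤ c1 := by
      rcases List.mem_cons.mp hmema with h | h
      · omega
      · rcases List.mem_cons.mp h with h | h
        · omega
        · have := h2 a h; omega
    have hb1 : b ≤ c1 := by
      rcases List.mem_cons.mp hmemb with h | h
      · omega
      · rcases List.mem_cons.mp h with h | h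
        · omega
        · have := h2 b h; omega
    have hmin : a ≤ c2 ∨ b ≤ c2 := by
      by_contra hcon
      push Not at hcon
      obtain ⟨ha2, hb2⟩ := hcon
      have ha : a = c1 := by
        rcases List.mem_cons.mp hmema with h | h
        · exact h
        · rcases List.mem_cons.mp h with h | h
          · omega
          · have := h2 a h; omega
      have hb : b = c1 := by
        rcases List.mem_cons.mp hmemb with h | h
        · exact h
        · rcases List.mem_cons.mp h with h | h
          · omega
          · have := h2 b h; omega
      rw [ha] at ha2
      rw [ha, hb] at hsub
      have hcnt := hsub.count_le c1
      have hz : List.count c1 (c2 :: rest) = 0 := by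
        rw [List.count_eq_zero]
        intro hmem'
        rcases List.mem_cons.mp hmem' with h | h
        · omega
        · have := h2 c1 h; omega
      simp [hz] at hcnt
    unfold fhCost at hcost ⊢
    rcases hmin with h | h <;> omega
  · intro h
    refine ⟨c1, c2, ?_, h⟩
    exact (show List.Sublist [c1, c2] (c1 :: c2 :: rest) by simp).subperm

-- A's double scan over distinct ranks, read as a statement about the multiset of counts
theorem A_case3_iff (pairs : List (Int × Int)) (j : Int) (hn : (pairs.map Prod.fst).Nodup) :
    ((PySem.Dict.keys (PySem.Dict.mk pairs)).any (fun t =>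
      (PySem.Dict.keys (PySem.Dict.mk pairs)).any (fun p =>
        if t ≠ p then
          decide (max 0 (3 - PySem.Dict.getD (PySem.Dict.mk pairs) t 0) +
                  max 0 (2 - PySem.Dict.getD (PySem.Dict.mk pairs) p 0) ≤ j)
        else false)) = true)
    ↔ fhEx (pairs.map Prod.snd) j := by
  have hkeys : PySem.Dict.keys (PySem.Dict.mk pairs) = pairs.map Prod.fst := rfl
  rw [hkeys]
  constructor
  · rw [List.any_eq_true]
    rintro ⟨t, ht, hA⟩
    rw [List.any_eq_true] at hA
    obtain ⟨p, hp, hA⟩ := hA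
    by_cases hne : t ≠ p
    swap
    · simp [hne] at hA
    rw [if_pos hne, decide_eq_true_iff] at hA
    obtain ⟨pt, hpt, rfl⟩ := List.mem_map.mp ht
    obtain ⟨pp, hpp, rfl⟩ := List.mem_map.mp hp
    have hgt : PySem.Dict.getD (PySem.Dict.mk pairs) pt.1 0 = pt.2 :=
      PySem.Dict.getD_of_mem_items _ (by simpa using hpt) hn 0
    have hgp : PySem.Dict.getD (PySem.Dict.mk pairs) pp.1 0 = pp.2 :=
      PySem.Dict.getD_of_mem_items _ (by simpa using hpp) hn 0
    rw [hgt, hgp] at hA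
    have hnepair : pt ≠ pp := fun h => hne (by rw [h])
    have hsub : List.Subperm [pt, pp] pairs := subperm_pair_of_mem hpt hpp hnepair
    refine ⟨pt.2, pp.2, ?_, hA⟩
    simpa using subperm_map_snd hsub
  · rintro ⟨a, b, hsub, hcost⟩
    obtain ⟨u, hup, hus⟩ := hsub
    rw [List.sublist_map_iff] at hus
    obtain ⟨w, hw, rfl⟩ := hus
    rcases w with _ | ⟨p, w⟩
    · simpa using hup.length_eq
    rcases w with _ | ⟨q, w⟩
    · simpa using hup.length_eq
    rcases w with _ | ⟨r, w⟩
    swap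
    · simpa using hup.length_eq
    simp only [List.map] at hup
    have hpmem : p ∈ pairs := hw.subset (by simp)
    have hqmem : q ∈ pairs := hw.subset (by simp)
    have hne1 : p.1 ≠ q.1 := by
      have := (hw.map Prod.fst).nodup hn
      simpa using this
    have hgp : PySem.Dict.getD (PySem.Dict.mk pairs) p.1 0 = p.2 :=
      PySem.Dict.getD_of_mem_items _ (by simpa using hpmem) hn 0
    have hgq : PySem.Dict.getD (PySem.Dict.mk pairs) q.1 0 = q.2 :=
      PySem.Dict.getD_of_mem_items _ (by simpa using hqmem) hn 0
    rcases perm_pair_cases hup with ⟨h1, h2⟩ | ⟨h1, h2⟩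
    · rw [List.any_eq_true]
      refine ⟨p.1, List.mem_map.mpr ⟨p, hpmem, rfl⟩, ?_⟩
      rw [List.any_eq_true]
      refine ⟨q.1, List.mem_map.mpr ⟨q, hqmem, rfl⟩, ?_⟩
      rw [if_pos hne1, decide_eq_true_iff, hgp, hgq, h1, h2]
      exact hcost
    · rw [List.any_eq_true]
      refine ⟨q.1, List.mem_map.mpr ⟨q, hqmem, rfl⟩, ?_⟩
      rw [List.any_eq_true]
      refine ⟨p.1, List.mem_map.mpr ⟨p, hpmem, rfl⟩, ?_⟩
      rw [if_pos (Ne.symm hne1), decide_eq_true_iff, hgq, hgp, h1, h2]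
      exact hcost

-- the two-or-more-ranks case, assembled
theorem main_case (pairs : List (Int × Int)) (j : Int)
    (hn : (pairs.map Prod.fst).Nodup) (h2 : 2 ≤ pairs.length) :
    can_form_full_house_pattern_py pairs j = can_form_full_house_pattern_py_alt pairs j := by
  have hklen : (PySem.Dict.keys (PySem.Dict.mk pairs)).length = pairs.length := by
    simp [PySem.Dict.keys]
  have hvals : PySem.Dict.values (PySem.Dict.mk pairs) = pairs.map Prod.snd := rfl
  have hperm : (PySem.List.sorted (pairs.map Prod.snd) (fun x => x) true).Perm (pairs.map Prod.snd) :=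
    PySem.List.sorted_perm _ _ _
  have hslen : 2 ≤ (PySem.List.sorted (pairs.map Prod.snd) (fun x => x) true).length := by
    rw [hperm.length_eq]; simpa using h2
  have hpw : (PySem.List.sorted (pairs.map Prod.snd) (fun x => x) true).Pairwise (fun a b => b ≤ a) := by
    have := PySem.List.sorted_pairwise_rev (xs := pairs.map Prod.snd) (key := fun x => x)
    simpa using this
  rcases hs : PySem.List.sorted (pairs.map Prod.snd) (fun x => x) true with _ | ⟨c1, s⟩
  · rw [hs] at hslen; simp at hslen
  rcases s with _ | ⟨c2, srest⟩
  · rw [hs] at hslen; simp at hslen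
  rw [hs] at hperm hpw
  have hk0 : ¬ (PySem.Dict.keys (PySem.Dict.mk pairs)).length = 0 := by omega
  have hk1 : ¬ (PySem.Dict.keys (PySem.Dict.mk pairs)).length = 1 := by omega
  have hp0 : ¬ pairs.length = 0 := by omega
  simp only [can_form_full_house_pattern_py, can_form_full_house_pattern_py_alt,
    hvals, hs, if_neg hk0, if_neg hk1, if_neg hp0]
  have hpad : ¬ ((c1 :: c2 :: srest).length = 1) := by simp
  rw [if_neg hpad]
  rw [Bool.eq_iff_iff]
  rw [A_case3_iff pairs j hn, decide_eq_true_iff]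
  rw [fhEx_perm hperm.symm, fhEx_top2 hpw]
  unfold fhCost
  simp

-- ===== VERDICT (by name: the statement is the Claim_ definition above) =====
theorem can_form_full_house_pattern_py_spec : Claim_equal_can_form_full_house_pattern_py := by
  intro pairs j _hdom hpre
  unfold Pre_can_form_full_house_pattern_py at hpre
  unfold Spec_can_form_full_house_pattern_py
  rcases pairs with _ | ⟨p, rest⟩
  · rfl
  rcases rest with _ | ⟨q, rest⟩
  · -- exactly one rank
    have hget : PySem.Dict.getD (PySem.Dict.mk [p]) p.1 0 = p.2 :=
      PySem.Dict.getD_of_mem_items _ (by simp) (by simp) 0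
    have hkeys1 : PySem.Dict.keys (PySem.Dict.mk [p]) = [p.1] := rfl
    have hsort : PySem.List.sorted (PySem.Dict.values (PySem.Dict.mk [p])) (fun x => x) true = [p.2] := rfl
    simp only [can_form_full_house_pattern_py, can_form_full_house_pattern_py_alt,
      hkeys1, hsort, hget, List.length_cons, List.length_nil, List.headD]
    by_cases h : p.2 + j ≥ 3 <;> simp [h] <;> omega
  · exact main_case (p :: q :: rest) j hpre (by simp)
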